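-- pv_equiv track=rewrite | github.com/dbcjason/NCAAWCards | pull_cbbd_lineups_plays_only_chunked_tmp.py | date_range_from_games
-- ===== SOURCE A (Python) =====
-- from typing import Any
--
-- def date_range_from_games(games: list[dict[str, Any]]) -> tuple[str | None, str | None]:
--     dates: list[str] = []
--     for g in games:
--         dt = g.get("startDate")
--         if isinstance(dt, str) and dt:
--             dates.append(dt[:10])
--     if not dates:
--         return None, None
--     return min(dates), max(dates)
-- ===== SOURCE B (Python) =====
-- def date_range_from_games(games):
--     lo = hi = None
--     for g in games:
--         dt = g.get("startDate")
--         if isinstance(dt, str) and dt: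
--             d = dt[:10]
--             if lo is None or d < lo:
--                 lo = d
--             if hi is None or hi < d:
--                 hi = d
--     return lo, hi
-- ===== Notes on version B (the rewrite author's own statement) =====
-- stated objective: simpler
-- what changed: Replaced build-a-list-then-min/max with a single pass keeping two running accumulators (lo, hi), so no intermediate list is materialised and the empty case falls out naturally.
import Mathlib
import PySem

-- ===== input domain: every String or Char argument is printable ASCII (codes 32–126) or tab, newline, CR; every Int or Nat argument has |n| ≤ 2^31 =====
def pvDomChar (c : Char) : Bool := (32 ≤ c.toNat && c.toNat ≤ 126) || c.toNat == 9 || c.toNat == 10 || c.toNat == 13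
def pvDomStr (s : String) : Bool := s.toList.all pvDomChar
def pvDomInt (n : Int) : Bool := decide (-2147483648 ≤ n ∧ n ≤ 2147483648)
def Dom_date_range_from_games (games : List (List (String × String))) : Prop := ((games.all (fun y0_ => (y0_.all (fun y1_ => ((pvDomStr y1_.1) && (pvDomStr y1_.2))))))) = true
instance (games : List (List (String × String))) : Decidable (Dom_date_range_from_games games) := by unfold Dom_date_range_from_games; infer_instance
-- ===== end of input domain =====

-- ===== PORT A =====
-- B replaces build-a-list-then-min/max with one pass over two running accumulators (objective: simpler).
-- dict values are String under the type convention, so `isinstance(dt, str)` holds whenever the key is present;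
-- g.get("startDate") is a first-match association-list lookup (List.lookup).
def date_range_from_games (games : List (List (String × String))) : Option String × Option String :=
  let dates : List String := games.foldl (fun dates g =>
    match g.lookup "startDate" with
    | some dt => if dt ≠ "" then dates ++ [PySem.Str.slice dt none (some 10)] else dates
    | none => dates) []
  if dates = [] then (none, none)
  else (PySem.List.min? dates (fun x => x), PySem.List.max? dates (fun x => x))

-- ===== PORT B =====
def date_range_from_games_alt (games : List (List (String × String))) : Option String × Option String :=
  games.foldl (fun lohi g =>
    match g.lookup "startDate" with
    | some dt =>
      if dt ≠ "" then
        let d := PySem.Str.slice dt none (some 10)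
        ((match lohi.1 with | none => some d | some lo => if d < lo then some d else some lo),
         (match lohi.2 with | none => some d | some hi => if hi < d then some d else some hi))
      else lohi
    | none => lohi) (none, none)

-- ===== PRECONDITION & SPEC =====
def Spec_date_range_from_games (games : List (List (String × String))) (out : Option String × Option String) : Prop := out = date_range_from_games_alt games
instance (games : List (List (String × String))) (out : Option String × Option String) : Decidable (Spec_date_range_from_games games out) := by unfold Spec_date_range_from_games; infer_instance

-- ===== CLAIM (what is proved, stated in full; the proofs are below) =====
def Claim_equal_date_range_from_games : Prop := ∀ (games : List (List (String × String))), Dom_date_range_from_games games → Spec_date_range_from_games games (date_range_from_games games)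

-- ===== LEMMAS AND PROOFS =====

-- the record-to-date extraction both loops perform, as a filterMap step
def pvDate? (g : List (String × String)) : Option String :=
  match g.lookup "startDate" with
  | some dt => if dt ≠ "" then some (PySem.Str.slice dt none (some 10)) else none
  | none => none

theorem pvA_dates (games : List (List (String × String))) (acc : List String) :
    games.foldl (fun dates g =>
      match g.lookup "startDate" with
      | some dt => if dt ≠ "" then dates ++ [PySem.Str.slice dt none (some 10)] else dates
      | none => dates) acc = acc ++ games.filterMap pvDate? := by
  induction games generalizing acc with
  | nil => simp
  | cons g t ih =>
    simp only [List.foldl_cons, List.filterMap_cons]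
    cases hg : g.lookup "startDate" with
    | none =>
      rw [show pvDate? g = none by simp [pvDate?, hg]]
      simp only [hg]
      exact ih acc
    | some dt =>
      by_cases h : dt = ""
      · rw [show pvDate? g = none by simp [pvDate?, hg, h]]
        simp only [hg]
        rw [if_neg (not_not_intro h)]
        exact ih acc
      · rw [show pvDate? g = some (PySem.Str.slice dt none (some 10)) by simp [pvDate?, hg, h]]
        simp only [hg]
        rw [if_pos h, ih (acc ++ [PySem.Str.slice dt none (some 10)])]
        simp

def pvStepMin (o : Option String) (d : String) : Option String :=
  match o with | none => some d | some lo => if d < lo then some d else some lo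

def pvStepMax (o : Option String) (d : String) : Option String :=
  match o with | none => some d | some hi => if hi < d then some d else some hi

theorem pvB_split (games : List (List (String × String))) (o1 o2 : Option String) :
    games.foldl (fun lohi g =>
      match g.lookup "startDate" with
      | some dt =>
        if dt ≠ "" then
          let d := PySem.Str.slice dt none (some 10)
          ((match lohi.1 with | none => some d | some lo => if d < lo then some d else some lo),
           (match lohi.2 with | none => some d | some hi => if hi < d then some d else some hi))
        else lohi
      | none => lohi) (o1, o2)
    = ((games.filterMap pvDate?).foldl pvStepMin o1,
       (games.filterMap pvDate?).foldl pvStepMax o2) := by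
  induction games generalizing o1 o2 with
  | nil => simp
  | cons g t ih =>
    simp only [List.foldl_cons, List.filterMap_cons]
    cases hg : g.lookup "startDate" with
    | none =>
      rw [show pvDate? g = none by simp [pvDate?, hg]]
      simp only [hg]
      exact ih o1 o2
    | some dt =>
      by_cases h : dt = ""
      · rw [show pvDate? g = none by simp [pvDate?, hg, h]]
        simp only [hg]
        rw [if_neg (not_not_intro h)]
        exact ih o1 o2
      · rw [show pvDate? g = some (PySem.Str.slice dt none (some 10)) by simp [pvDate?, hg, h]]
        simp only [hg]
        rw [if_pos h, List.foldl_cons, List.foldl_cons]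
        exact ih (pvStepMin o1 (PySem.Str.slice dt none (some 10)))
                 (pvStepMax o2 (PySem.Str.slice dt none (some 10)))

theorem pvStepMin_some (x : String) (ds : List String) :
    ds.foldl pvStepMin (some x) = some (ds.foldl min x) := by
  induction ds generalizing x with
  | nil => rfl
  | cons d t ih =>
    simp only [List.foldl_cons, pvStepMin]
    rw [show (if d < x then some d else some x) = some (min x d) by
      by_cases h : d < x
      · rw [if_pos h, min_eq_right h.le]
      · rw [if_neg h, min_eq_left (not_lt.mp h)]]
    exact ih (min x d)

theorem pvStepMax_some (x : String) (ds : List String) :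
    ds.foldl pvStepMax (some x) = some (ds.foldl max x) := by
  induction ds generalizing x with
  | nil => rfl
  | cons d t ih =>
    simp only [List.foldl_cons, pvStepMax]
    rw [show (if x < d then some d else some x) = some (max x d) by
      by_cases h : x < d
      · rw [if_pos h, max_eq_right h.le]
      · rw [if_neg h, max_eq_left (not_lt.mp h)]]
    exact ih (max x d)

theorem pvStepMin_none (ds : List String) :
    ds.foldl pvStepMin none = PySem.List.min? ds (fun x => x) := by
  cases ds with
  | nil => rfl
  | cons d t =>
    rw [PySem.List.min?_id_cons]
    simpa [pvStepMin] using pvStepMin_some d t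

theorem pvStepMax_none (ds : List String) :
    ds.foldl pvStepMax none = PySem.List.max? ds (fun x => x) := by
  cases ds with
  | nil => rfl
  | cons d t =>
    rw [PySem.List.max?_id_cons]
    simpa [pvStepMax] using pvStepMax_some d t

-- ===== VERDICT (by name: the statement is the Claim_ definition above) =====
theorem date_range_from_games_spec : Claim_equal_date_range_from_games := by
  intro games _
  show _ = _
  unfold date_range_from_games date_range_from_games_alt
  rw [pvA_dates games [], pvB_split games none none, pvStepMin_none, pvStepMax_none,
    List.nil_append]
  by_cases h : games.filterMap pvDate? = []
  · simp [h, PySem.List.min?, PySem.List.max?]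
  · simp [h]
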